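-- pv_equiv track=rewrite | github.com/afriddev/DSA | arrays/reArrangeWith-1.py | solution
-- ===== SOURCE A (Python) =====
-- def solution(array):
--     emptyArray = []
--     for i in range(0,len(array)):
--         if(i in array):
--             emptyArray.append(i)
--         else:
--             emptyArray.append(-1)
--     return emptyArray
-- ===== SOURCE B (Python) =====
-- def solution(array):
--     n = len(array)
--     result = [-1] * n
--     for v in array:
--         if 0 <= v < n:
--             result[v] = v
--     return result
-- ===== Notes on version B (the rewrite author's own statement) =====
-- stated objective: faster
-- what changed: Instead of testing each index for membership in the array (an inner linear scan per index), B preallocates a sentinel-filled result of the same length and scatters each in-range value into its own slot in one pass.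
import Mathlib
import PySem

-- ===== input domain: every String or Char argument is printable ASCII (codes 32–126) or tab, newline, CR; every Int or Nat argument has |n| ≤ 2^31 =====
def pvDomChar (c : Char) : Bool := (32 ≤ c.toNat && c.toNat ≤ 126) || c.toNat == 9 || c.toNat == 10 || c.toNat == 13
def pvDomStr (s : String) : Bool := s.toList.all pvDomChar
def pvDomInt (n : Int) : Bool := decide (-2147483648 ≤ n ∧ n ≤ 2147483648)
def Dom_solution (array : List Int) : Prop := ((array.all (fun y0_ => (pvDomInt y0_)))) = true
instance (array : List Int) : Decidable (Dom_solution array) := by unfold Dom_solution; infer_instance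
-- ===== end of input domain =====

-- B replaces A's per-index membership scan by a single scatter pass into a preallocated [-1]*n list (objective: faster).

-- ===== PORT A =====
-- for i in range(0, len(array)): append i if i in array else append -1
def solution (array : List Int) : List Int :=
  (PySem.List.pyRange 0 (array.length : Int) 1).foldl
    (fun emptyArray i => if i ∈ array then emptyArray ++ [i] else emptyArray ++ [-1]) []

-- ===== PORT B =====
-- result = [-1]*n; for v in array: if 0 <= v < n: result[v] = v
def solution_alt (array : List Int) : List Int :=
  array.foldl
    (fun result v =>
      if 0 ≤ v ∧ v < (array.length : Int) then result.set v.toNat v else result)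
    (List.replicate array.length (-1))

-- ===== PRECONDITION & SPEC =====
def Spec_solution (array : List Int) (out : List Int) : Prop := out = solution_alt array
instance (array : List Int) (out : List Int) : Decidable (Spec_solution array out) := by unfold Spec_solution; infer_instance

-- ===== CLAIM (what is proved, stated in full; the proofs are below) =====
def Claim_equal_solution : Prop := ∀ (array : List Int), Dom_solution array → Spec_solution array (solution array)

-- ===== LEMMAS AND PROOFS =====

theorem pv_solution_eq_map (array : List Int) :
    solution array =
      (PySem.List.pyRange 0 (array.length : Int) 1).map
        (fun i => if i ∈ array then i else -1) := by
  unfold solution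
  have h : (fun (emptyArray : List Int) (i : Int) =>
      if i ∈ array then emptyArray ++ [i] else emptyArray ++ [-1]) =
      (fun (emptyArray : List Int) (i : Int) =>
          emptyArray ++ [if i ∈ array then i else -1]) := by
    funext acc i; by_cases hi : i ∈ array <;> simp [hi]
  rw [h, PySem.List.foldl_append_singleton_eq_map]
  simp

-- the scatter loop of B, characterised slot by slot
theorem pv_scatter_get (n : Nat) (l : List Int) (init : List Int) (hlen : init.length = n)
    (j : Nat) (hj : j < n) :
    (l.foldl (fun result v =>
        if 0 ≤ v ∧ v < (n : Int) then result.set v.toNat v else result) init)[j]? =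
      some (if (j : Int) ∈ l then (j : Int) else init.getD j (-1)) := by
  induction l generalizing init with
  | nil =>
    simp [List.getD_eq_getElem?_getD, List.getElem?_eq_getElem (hlen ▸ hj)]
  | cons v t ih =>
    simp only [List.foldl_cons]
    set init' : List Int := if 0 ≤ v ∧ v < (n : Int) then init.set v.toNat v else init with hinit'
    have hlen' : init'.length = n := by
      simp [hinit']; split <;> simp [hlen]
    rw [ih init' hlen']
    by_cases ht : (j : Int) ∈ t
    · simp [ht]
    · by_cases hv : v = (j : Int)
      · subst hv
        have hg : (0 : Int) ≤ (j : Int) ∧ (j : Int) < (n : Int) := by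
          constructor
          · exact Int.natCast_nonneg j
          · exact_mod_cast hj
        simp only [hinit', if_pos hg, ht, List.mem_cons, or_false]
        have hjj : ((j : Int).toNat) = j := by simp
        simp [hjj, List.getD_eq_getElem?_getD, hlen, hj]
      · have hmem : ¬ ((j : Int) ∈ v :: t) := by
          intro h
          rcases List.mem_cons.mp h with h | h
          · exact hv h.symm
          · exact ht h
        rw [if_neg ht, if_neg hmem]
        congr 1
        simp only [hinit']
        split
        · next hg =>
          have hne : v.toNat ≠ j := by
            intro he
            apply hv
            rw [← he]
            exact (Int.toNat_of_nonneg hg.1).symm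
          simp [List.getD_eq_getElem?_getD, List.getElem?_set_ne hne]
        · rfl

theorem pv_scatter_length (n : Nat) (l : List Int) (init : List Int) :
    (l.foldl (fun result v =>
        if 0 ≤ v ∧ v < (n : Int) then result.set v.toNat v else result) init).length =
      init.length := by
  induction l generalizing init with
  | nil => rfl
  | cons v t ih =>
    simp only [List.foldl_cons]
    rw [ih]
    split <;> simp

-- ===== VERDICT (by name: the statement is the Claim_ definition above) =====
theorem solution_spec : Claim_equal_solution := by
  intro array _
  unfold Spec_solution
  rw [pv_solution_eq_map]
  unfold solution_alt
  apply List.ext_getElem?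
  intro j
  by_cases hj : j < array.length
  · rw [pv_scatter_get array.length array (List.replicate array.length (-1))
        (by simp) j hj]
    rw [PySem.List.getElem?_map_pyRange_zero _ _ _ hj]
    simp
  · have h1 : ((PySem.List.pyRange 0 (array.length : Int) 1).map
        (fun i => if i ∈ array then i else -1)).length = array.length := by
      simp [PySem.List.length_pyRange_one]
    have h2 := pv_scatter_length array.length array (List.replicate array.length (-1))
    rw [List.getElem?_eq_none (by omega), List.getElem?_eq_none (by rw [h2]; simp; omega)]
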